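-- pv_equiv track=rewrite | github.com/Taiwing/ft_strace | resources/find.py | format_parameter
-- ===== SOURCE A (Python) =====
-- def format_parameter(raw_param):
--     raw_param = raw_param.strip().split()
--     param = []
--     for token in raw_param:
--         token = token.strip()
--         if token == "__user":
--             continue
--         while token.startswith("*") and len(token) > 1:
--             param.append("*")
--             token = token[1:]
--         param.append(token)
--     return " ".join(param)
-- ===== SOURCE B (Python) =====
-- def format_parameter(raw_param):
--     param = []
--     for token in raw_param.split():
--         if token == "__user":
--             continue
--         stripped = token.lstrip('*')
--         param.extend(['*'] * (len(token) - len(stripped)))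
--         if stripped:
--             param.append(stripped)
--     return " ".join(param)
-- ===== Notes on version B (the rewrite author's own statement) =====
-- stated objective: simpler
-- what changed: The inner while-loop that peels leading asterisks one character per iteration (rebuilding the token each time) is replaced by a single lstrip count-and-slice: append the counted stars at once and the stripped remainder only if non-empty; the redundant outer and per-token strip calls are dropped.
import Mathlib
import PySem

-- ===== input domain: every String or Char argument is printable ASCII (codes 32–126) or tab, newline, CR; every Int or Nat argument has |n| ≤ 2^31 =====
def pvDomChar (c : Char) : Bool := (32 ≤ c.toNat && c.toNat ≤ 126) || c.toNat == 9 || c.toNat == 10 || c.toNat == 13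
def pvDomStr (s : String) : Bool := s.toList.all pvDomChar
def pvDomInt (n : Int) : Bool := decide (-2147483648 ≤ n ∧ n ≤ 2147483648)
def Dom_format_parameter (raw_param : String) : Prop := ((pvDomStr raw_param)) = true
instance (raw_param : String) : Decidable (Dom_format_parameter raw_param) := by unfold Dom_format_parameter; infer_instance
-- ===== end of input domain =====

-- B replaces A's character-at-a-time star-peeling while-loop by one lstrip
-- count-and-slice step and drops the redundant strip() calls (objective: simpler).

-- ===== PORT A =====
-- the inner 'while token.startswith("*") and len(token) > 1' loop of A
def pyPeel (token : List Char) (param : List (List Char)) : List (List Char) :=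
  if _h : PySem.Chars.startswith token ['*'] && token.length > 1 then
    pyPeel (token.drop 1) (param ++ [['*']])
  else
    param ++ [token]
termination_by token.length
decreasing_by
  simp only [Bool.and_eq_true, decide_eq_true_eq] at _h
  simp only [List.length_drop]; omega

def format_parameter (raw_param : String) : String :=
  -- raw_param = raw_param.strip().split()
  let tokens := PySem.Chars.split₀ (PySem.Chars.strip raw_param.toList)
  let param := tokens.foldl (fun param token =>
      let token := PySem.Chars.strip token
      if token = "__user".toList then param
      else pyPeel token param) []
  String.ofList (PySem.Chars.join [' '] param)

-- ===== PORT B =====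
def format_parameter_alt (raw_param : String) : String :=
  let param := (PySem.Chars.split₀ raw_param.toList).foldl (fun param token =>
      if token = "__user".toList then param
      else
        -- stripped = token.lstrip('*'): exact, the strip set has the single char '*'
        let stripped := token.dropWhile (· == '*')
        let param := param ++ List.replicate (token.length - stripped.length) ['*']
        if stripped.isEmpty then param else param ++ [stripped]) []
  String.ofList (PySem.Chars.join [' '] param)

-- ===== PRECONDITION & SPEC =====
def Spec_format_parameter (raw_param : String) (out : String) : Prop := out = format_parameter_alt raw_param
instance (raw_param : String) (out : String) : Decidable (Spec_format_parameter raw_param out) := by unfold Spec_format_parameter; infer_instance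

-- ===== CLAIM (what is proved, stated in full; the proofs are below) =====
def Claim_equal_format_parameter : Prop := ∀ (raw_param : String), Dom_format_parameter raw_param → Spec_format_parameter raw_param (format_parameter raw_param)

-- ===== LEMMAS AND PROOFS =====

-- split₀.go on an all-whitespace input just flushes the accumulator
theorem go_allspace (w : List Char) (acc : List (List Char))
    (hw : ∀ c ∈ w, PySem.Chars.isspace c = true) :
    PySem.Chars.split₀.go w [] acc = acc.reverse := by
  induction w generalizing acc with
  | nil => simp [PySem.Chars.split₀.go]
  | cons c w ih =>
      have hc := hw c (by simp)
      simp [PySem.Chars.split₀.go, hc, ih _ (fun d hd => hw d (by simp [hd]))]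

-- trailing whitespace does not change split₀.go
theorem go_append_space (s w : List Char) (cur : List Char) (acc : List (List Char))
    (hw : ∀ c ∈ w, PySem.Chars.isspace c = true) :
    PySem.Chars.split₀.go (s ++ w) cur acc = PySem.Chars.split₀.go s cur acc := by
  induction s generalizing cur acc with
  | nil =>
      cases w with
      | nil => rfl
      | cons c w =>
          have hc := hw c (by simp)
          have hw' : ∀ d ∈ w, PySem.Chars.isspace d = true := fun d hd => hw d (by simp [hd])
          by_cases hcur : cur = []
          · subst hcur
            simp [PySem.Chars.split₀.go, hc, go_allspace w acc hw']
          · simp [PySem.Chars.split₀.go, hc, List.isEmpty_iff, hcur,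
              go_allspace w (cur.reverse :: acc) hw']
  | cons c s ih =>
      by_cases hc : PySem.Chars.isspace c = true
      · by_cases hcur : cur = []
        · subst hcur; simp [PySem.Chars.split₀.go, hc, ih]
        · simp [PySem.Chars.split₀.go, hc, List.isEmpty_iff, hcur, ih]
      · simp [PySem.Chars.split₀.go, hc, ih]

-- leading whitespace does not change split₀.go (on empty current token)
theorem go_space_prefix (w s : List Char) (acc : List (List Char))
    (hw : ∀ c ∈ w, PySem.Chars.isspace c = true) :
    PySem.Chars.split₀.go (w ++ s) [] acc = PySem.Chars.split₀.go s [] acc := by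
  induction w with
  | nil => rfl
  | cons c w ih =>
      have hc := hw c (by simp)
      simp [PySem.Chars.split₀.go, hc, ih (fun d hd => hw d (by simp [hd]))]

-- .strip() before .split() is redundant
theorem split₀_strip (s : List Char) :
    PySem.Chars.split₀ (PySem.Chars.strip s) = PySem.Chars.split₀ s := by
  unfold PySem.Chars.split₀ PySem.Chars.strip PySem.Chars.lstrip PySem.Chars.rstrip
  set p := PySem.Chars.isspace
  set u := List.dropWhile p s with hu
  have h1 : PySem.Chars.split₀.go s [] [] = PySem.Chars.split₀.go u [] [] := by
    conv_lhs => rw [← List.takeWhile_append_dropWhile (p := p) (l := s)]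
    exact go_space_prefix _ _ _ (fun c hc => List.mem_takeWhile_imp hc)
  have h2 : u = (List.dropWhile p u.reverse).reverse ++ (List.takeWhile p u.reverse).reverse := by
    rw [← List.reverse_append, List.takeWhile_append_dropWhile, List.reverse_reverse]
  rw [h1]
  conv_rhs => rw [h2]
  rw [go_append_space]
  intro c hc
  exact List.mem_takeWhile_imp (List.mem_reverse.mp hc)

-- every token produced by split₀.go is non-empty and whitespace-free
theorem go_tokens (s cur : List Char) (acc : List (List Char))
    (hacc : ∀ x ∈ acc, x ≠ [] ∧ ∀ c ∈ x, PySem.Chars.isspace c = false)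
    (hcur : ∀ c ∈ cur, PySem.Chars.isspace c = false) :
    ∀ t ∈ PySem.Chars.split₀.go s cur acc, t ≠ [] ∧ ∀ c ∈ t, PySem.Chars.isspace c = false := by
  induction s generalizing cur acc with
  | nil =>
      intro t ht
      by_cases hc : cur = []
      · subst hc; simp [PySem.Chars.split₀.go] at ht; exact hacc t ht
      · simp [PySem.Chars.split₀.go, List.isEmpty_iff, hc] at ht
        rcases ht with h | h
        · exact hacc t h
        · subst h
          exact ⟨by simpa using hc, fun c hcm => hcur c (List.mem_reverse.mp hcm)⟩
  | cons c s ih =>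
      intro t ht
      by_cases hc : PySem.Chars.isspace c = true
      · by_cases hcur0 : cur = []
        · subst hcur0
          simp only [PySem.Chars.split₀.go, hc, List.isEmpty_nil] at ht
          exact ih [] acc hacc (by simp) t (by simpa using ht)
        · simp only [PySem.Chars.split₀.go, hc, List.isEmpty_iff, if_neg hcur0] at ht
          refine ih [] (cur.reverse :: acc) ?_ (by simp) t (by simpa using ht)
          intro x hx
          rcases List.mem_cons.mp hx with h | h
          · subst h
            exact ⟨by simpa using hcur0, fun d hd => hcur d (List.mem_reverse.mp hd)⟩
          · exact hacc x h
      · simp only [PySem.Chars.split₀.go, if_neg hc] at ht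
        refine ih (c :: cur) acc hacc ?_ t ht
        intro d hd
        rcases List.mem_cons.mp hd with h | h
        · subst h; exact Bool.eq_false_iff.mpr hc
        · exact hcur d h

-- strip is the identity on whitespace-free strings
theorem strip_of_nospace (t : List Char)
    (h : ∀ c ∈ t, PySem.Chars.isspace c = false) :
    PySem.Chars.strip t = t := by
  unfold PySem.Chars.strip PySem.Chars.lstrip PySem.Chars.rstrip
  have hd : ∀ (l : List Char), (∀ c ∈ l, PySem.Chars.isspace c = false) →
      List.dropWhile PySem.Chars.isspace l = l := by
    intro l hl
    cases l with
    | nil => rfl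
    | cons c l => simp [List.dropWhile, hl c (by simp)]
  rw [hd t h, hd t.reverse (fun c hc => h c (List.mem_reverse.mp hc)), List.reverse_reverse]

-- A's star-peeling loop computes B's count-and-slice step
theorem pyPeel_eq (token : List Char) (param : List (List Char)) (hne : token ≠ []) :
    pyPeel token param =
      (param ++ List.replicate (token.length - (token.dropWhile (· == '*')).length) ['*']) ++
        (if (token.dropWhile (· == '*')).isEmpty then [] else [token.dropWhile (· == '*')]) := by
  induction token generalizing param with
  | nil => exact absurd rfl hne
  | cons c rest ih =>
      by_cases hc : c = '*'
      · subst hc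
        cases rest with
        | nil =>
            rw [pyPeel]
            simp [PySem.Chars.startswith, List.isPrefixOf, List.dropWhile]
        | cons r rs =>
            rw [pyPeel]
            have hcond : (PySem.Chars.startswith ('*' :: r :: rs) ['*'] &&
                decide (('*' :: r :: rs).length > 1)) = true := by
              simp [PySem.Chars.startswith, List.isPrefixOf]
            rw [dif_pos hcond]
            simp only [List.drop_succ_cons, List.drop_zero]
            rw [ih (param ++ [['*']]) (by simp)]
            have hle : (List.dropWhile (· == '*') (r :: rs)).length ≤ (r :: rs).length :=
              List.length_dropWhile_le _ _
            have hrep : List.replicate (('*' :: r :: rs).length -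
                (List.dropWhile (· == '*') ('*' :: r :: rs)).length) (['*'] : List Char) =
                ['*'] :: List.replicate ((r :: rs).length -
                  (List.dropWhile (· == '*') (r :: rs)).length) ['*'] := by
              have : List.dropWhile (· == '*') ('*' :: r :: rs) =
                  List.dropWhile (· == '*') (r :: rs) := by simp [List.dropWhile]
              rw [this]
              have hlen : ('*' :: r :: rs).length -
                  (List.dropWhile (· == '*') (r :: rs)).length =
                  ((r :: rs).length - (List.dropWhile (· == '*') (r :: rs)).length) + 1 := by
                simp only [List.length_cons] at *
                omega
              rw [hlen, List.replicate_succ]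
            rw [hrep]
            have : List.dropWhile (· == '*') ('*' :: r :: rs) =
                List.dropWhile (· == '*') (r :: rs) := by simp [List.dropWhile]
            rw [this]
            simp [List.append_assoc]
      · rw [pyPeel]
        have hbeq : (c == '*') = false := by simp [hc]
        have hstar : PySem.Chars.startswith (c :: rest) ['*'] = false := by
          simp [PySem.Chars.startswith, List.isPrefixOf]
          exact Ne.symm hc
        rw [dif_neg (by simp [hstar])]
        have hdw : List.dropWhile (· == '*') (c :: rest) = c :: rest := by
          simp [List.dropWhile, hbeq]
        rw [hdw]
        simp

-- the two per-token loop bodies agree on whitespace-free non-empty tokens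
theorem fold_eq (tokens : List (List Char)) (param : List (List Char))
    (htok : ∀ t ∈ tokens, t ≠ [] ∧ ∀ c ∈ t, PySem.Chars.isspace c = false) :
    tokens.foldl (fun param token =>
        let token := PySem.Chars.strip token
        if token = "__user".toList then param else pyPeel token param) param =
    tokens.foldl (fun param token =>
        if token = "__user".toList then param
        else
          let stripped := token.dropWhile (· == '*')
          let param := param ++ List.replicate (token.length - stripped.length) ['*']
          if stripped.isEmpty then param else param ++ [stripped]) param := by
  induction tokens generalizing param with
  | nil => rfl
  | cons t ts ih =>
      have ht := htok t (by simp)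
      have hts : ∀ t ∈ ts, t ≠ [] ∧ ∀ c ∈ t, PySem.Chars.isspace c = false :=
        fun x hx => htok x (by simp [hx])
      simp only [List.foldl_cons]
      rw [strip_of_nospace t ht.2]
      by_cases hu : t = "__user".toList
      · simp only [if_pos hu]; exact ih _ hts
      · simp only [if_neg hu]
        rw [pyPeel_eq t _ ht.1]
        by_cases he : (t.dropWhile (· == '*')).isEmpty
        · simp only [he, if_true, List.append_nil]
          rw [ih _ hts]
        · simp only [he]
          rw [ih _ hts]; simp

-- ===== VERDICT (by name: the statement is the Claim_ definition above) =====
theorem format_parameter_spec : Claim_equal_format_parameter := by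
  intro raw_param _
  unfold Spec_format_parameter format_parameter format_parameter_alt
  dsimp only
  rw [split₀_strip]
  have htok := go_tokens raw_param.toList [] [] (by simp) (by simp)
  rw [fold_eq _ _ (by exact htok)]
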